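-- pv_equiv track=rewrite | github.com/lichkovahadaniil/research_course_work | shuffler.py | get_dispersion_order
-- ===== SOURCE A (Python) =====
-- def kendall_tau_dist(order1: list, order2: list) -> int:
--     '''kendall-tau distance (numbers of inversions) the larger, the strongest the variance'''
--     pos = {act: idx for idx, act in enumerate(order2)}
--     inversions = 0
--     for i in range(len(order1)):
--         for j in range(i + 1, len(order1)):
--             if pos[order1[i]] > pos[order1[j]]: # 5 4 -> 4 5
--                 inversions += 1
--     return inversions
--
-- def get_dispersion_order(random_orders_list: list, freq_order: list) -> list:
--     """
--     Из 10 случайных перестановок выбирает ту, которая максимально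
--     отличается (по Kendall-tau) от frequency-упорядоченного списка.
--     """
--     max_dist = -1
--     best_order = None
--
--     for candidate in random_orders_list:
--         dist = kendall_tau_dist(candidate, freq_order)
--         if dist > max_dist:
--             max_dist = dist
--             best_order = candidate[:]
--
--     return best_order
-- ===== SOURCE B (Python) =====
-- def get_dispersion_order(random_orders_list: list, freq_order: list) -> list:
--     """Pick the random order with maximal Kendall-tau distance from freq_order,
--     counting inversions with merge sort (O(n log n) per candidate)."""
--     pos = {act: idx for idx, act in enumerate(freq_order)}
--
--     def ms(a):
--         # merge sort returning (sorted list, number of inversions)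
--         if len(a) <= 1:
--             return a, 0
--         m = len(a) // 2
--         left, x = ms(a[:m])
--         right, y = ms(a[m:])
--         merged = []
--         k = x + y
--         i = j = 0
--         while i < len(left) and j < len(right):
--             if left[i] <= right[j]:
--                 merged.append(left[i])
--                 i += 1
--             else:
--                 merged.append(right[j])
--                 k += len(left) - i
--                 j += 1
--         merged.extend(left[i:])
--         merged.extend(right[j:])
--         return merged, k
--
--     best_dist = -1
--     best_order = None
--     for candidate in random_orders_list:
--         if len(candidate) < 2:
--             dist = 0  # no pairs, no inversions; skip mapping through pos
--         else:
--             _, dist = ms([pos[x] for x in candidate])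
--         if dist > best_dist:
--             best_dist = dist
--             best_order = candidate[:]
--     return best_order
-- ===== Notes on version B (the rewrite author's own statement) =====
-- stated objective: faster
-- what changed: B counts each candidate's inversions with a merge-sort (divide, recurse, count cross-inversions while merging) over the candidate's position sequence instead of A's nested index-pair scan, scoring trivial (<2 element) candidates as 0 directly.
import Mathlib
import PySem

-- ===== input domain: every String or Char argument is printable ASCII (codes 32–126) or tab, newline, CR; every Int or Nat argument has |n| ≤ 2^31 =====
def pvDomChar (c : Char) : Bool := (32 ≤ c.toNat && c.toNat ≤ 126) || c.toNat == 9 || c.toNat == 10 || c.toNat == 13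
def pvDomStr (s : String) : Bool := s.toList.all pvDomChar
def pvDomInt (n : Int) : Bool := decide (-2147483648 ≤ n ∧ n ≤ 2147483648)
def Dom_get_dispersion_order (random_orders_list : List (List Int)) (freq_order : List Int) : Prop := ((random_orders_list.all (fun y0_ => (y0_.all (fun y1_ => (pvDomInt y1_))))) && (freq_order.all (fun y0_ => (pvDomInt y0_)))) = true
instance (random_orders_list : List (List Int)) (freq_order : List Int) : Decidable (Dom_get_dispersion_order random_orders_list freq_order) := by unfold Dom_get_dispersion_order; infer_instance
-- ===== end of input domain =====

-- B replaces A's O(n^2) index-pair inversion count by a merge-sort inversion count, O(n log n) per candidate.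

-- ===== PORT A =====
-- pos = {act: idx for idx, act in enumerate(order2)}  (shared by both Pythons verbatim)
def pvPosDict (order2 : List Int) : PySem.Dict Int Int :=
  (PySem.List.enumerate order2).foldl (fun d p => d.insert p.2 p.1) PySem.Dict.empty

-- kendall_tau_dist: the nested index loops; none = KeyError on pos[...]
def kendall_tau_dist (order1 order2 : List Int) : Option Int :=
  let pos := pvPosDict order2
  (PySem.List.pyRange 0 (order1.length : Int) 1).foldl
    (fun acc i =>
      (PySem.List.pyRange (i + 1) (order1.length : Int) 1).foldl
        (fun acc j =>
          match PySem.List.pyGet? order1 i, PySem.List.pyGet? order1 j with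
          | some xi, some xj =>
            match pos.get? xi, pos.get? xj with
            | some pi, some pj => acc.map (fun inv => if pj < pi then inv + 1 else inv)
            | _, _ => none
          | _, _ => none)
        acc)
    (some 0)

-- the selection loop of A (max_dist, best_order); none = an iteration raised
def pvALoop (freq_order : List Int) : List (List Int) → Int → Option (List Int) → Option (List Int)
  | [], _, best => best
  | c :: rest, maxD, best =>
    match kendall_tau_dist c freq_order with
    | none => none
    | some d => if d > maxD then pvALoop freq_order rest d (some c) else pvALoop freq_order rest maxD best

def get_dispersion_order (random_orders_list : List (List Int)) (freq_order : List Int) : Option (List Int) :=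
  pvALoop freq_order random_orders_list (-1) none

-- ===== PORT B =====
-- merge two runs, counting cross inversions (the while-loop of Source B)
def pvMergeCount : List Int → List Int → List Int × Int
  | [], ys => (ys, 0)
  | x :: xs, [] => (x :: xs, 0)
  | x :: xs, y :: ys =>
    if x ≤ y then
      let r := pvMergeCount xs (y :: ys)
      (x :: r.1, r.2)
    else
      let r := pvMergeCount (x :: xs) ys
      (y :: r.1, r.2 + ((x :: xs).length : Int))

-- ms(a) of Source B: (sorted list, inversion count)
def pvMsort (a : List Int) : List Int × Int :=
  if _h : a.length ≤ 1 then (a, 0)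
  else
    let m := a.length / 2
    let L := pvMsort (a.take m)
    let R := pvMsort (a.drop m)
    let mg := pvMergeCount L.1 R.1
    (mg.1, L.2 + R.2 + mg.2)
termination_by a.length
decreasing_by
  · simp only [List.length_take]; omega
  · simp only [List.length_drop]; omega

-- the selection loop of B; none = an iteration raised (pos lookup failed)
def pvAltLoop (pos : PySem.Dict Int Int) : List (List Int) → Int → Option (List Int) → Option (List Int)
  | [], _, best => best
  | c :: rest, bestD, best =>
    if c.length < 2 then
      if (0 : Int) > bestD then pvAltLoop pos rest 0 (some c) else pvAltLoop pos rest bestD best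
    else
      match c.mapM (fun x => pos.get? x) with
      | none => none
      | some seq =>
        let d := (pvMsort seq).2
        if d > bestD then pvAltLoop pos rest d (some c) else pvAltLoop pos rest bestD best

def get_dispersion_order_alt (random_orders_list : List (List Int)) (freq_order : List Int) : Option (List Int) :=
  pvAltLoop (pvPosDict freq_order) random_orders_list (-1) none

-- ===== PRECONDITION & SPEC =====
-- Pre_ excludes exactly the inputs on which A raises KeyError: a candidate with at least two
-- elements containing an element missing from freq_order (B raises there as well).
def Pre_get_dispersion_order (random_orders_list : List (List Int)) (freq_order : List Int) : Prop :=
  ∀ c ∈ random_orders_list, 2 ≤ c.length → ∀ x ∈ c, x ∈ freq_order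
instance (random_orders_list : List (List Int)) (freq_order : List Int) : Decidable (Pre_get_dispersion_order random_orders_list freq_order) := by unfold Pre_get_dispersion_order; infer_instance

def pvWitness_get_dispersion_order : List (List Int) × List Int := ([[1, 2], [2, 1]], [1, 2])

def Spec_get_dispersion_order (random_orders_list : List (List Int)) (freq_order : List Int) (out : Option (List Int)) : Prop := out = get_dispersion_order_alt random_orders_list freq_order
instance (random_orders_list : List (List Int)) (freq_order : List Int) (out : Option (List Int)) : Decidable (Spec_get_dispersion_order random_orders_list freq_order out) := by unfold Spec_get_dispersion_order; infer_instance

-- ===== CLAIM (what is proved, stated in full; the proofs are below) =====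
def Claim_equal_get_dispersion_order : Prop := ∀ (random_orders_list : List (List Int)) (freq_order : List Int), Dom_get_dispersion_order random_orders_list freq_order → Pre_get_dispersion_order random_orders_list freq_order → Spec_get_dispersion_order random_orders_list freq_order (get_dispersion_order random_orders_list freq_order)

-- ===== LEMMAS AND PROOFS =====

-- the naive pair-inversion count, the common reference point of both ports
def pvInvCount : List Int → Int
  | [] => 0
  | x :: rest => (rest.countP (fun y => decide (y < x)) : Int) + pvInvCount rest

-- cross inversions between two runs, summed over the right run
def pvCross (a b : List Int) : Int := (b.map (fun y => (a.countP (fun x => decide (y < x)) : Int))).sum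

theorem pvCross_nil_left (b : List Int) : pvCross [] b = 0 := by
  simp [pvCross]

theorem pvCross_nil_right (a : List Int) : pvCross a [] = 0 := rfl

theorem pvCross_cons_right (a : List Int) (y : Int) (b : List Int) :
    pvCross a (y :: b) = (a.countP (fun x => decide (y < x)) : Int) + pvCross a b := by
  simp [pvCross]

theorem pvCross_cons_left (x : Int) (a b : List Int) :
    pvCross (x :: a) b = (b.countP (fun y => decide (y < x)) : Int) + pvCross a b := by
  induction b with
  | nil => simp [pvCross]
  | cons y t ih =>
    simp only [pvCross, List.map_cons, List.sum_cons] at *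
    rw [List.countP_cons, List.countP_cons]
    by_cases hc : y < x <;> simp [hc] at * <;> omega

theorem pvInvCount_append (a b : List Int) :
    pvInvCount (a ++ b) = pvInvCount a + pvInvCount b + pvCross a b := by
  induction a with
  | nil => simp [pvInvCount, pvCross_nil_left]
  | cons x a ih =>
    simp only [List.cons_append, pvInvCount, List.countP_append, ih, pvCross_cons_left]
    push_cast
    ring

theorem pvCross_perm_left {a a' : List Int} (h : a.Perm a') (b : List Int) :
    pvCross a b = pvCross a' b := by
  unfold pvCross
  congr 1
  apply List.map_congr_left
  intro y _
  rw [h.countP_eq]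

theorem pvCross_perm_right (a : List Int) {b b' : List Int} (h : b.Perm b') :
    pvCross a b = pvCross a b' := by
  exact ((h.map _).sum_eq)

theorem pvMergeCount_spec : ∀ (a b : List Int), a.Pairwise (· ≤ ·) → b.Pairwise (· ≤ ·) →
    (pvMergeCount a b).1.Perm (a ++ b) ∧ (pvMergeCount a b).1.Pairwise (· ≤ ·) ∧
    (pvMergeCount a b).2 = pvCross a b := by
  intro a b
  induction a, b using pvMergeCount.induct with
  | case1 ys => intro _ hb; simpa [pvMergeCount, pvCross_nil_left] using hb
  | case2 x xs => intro ha _; simpa [pvMergeCount, pvCross_nil_right] using ha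
  | case3 x xs y ys hle ih =>
    intro ha hb
    obtain ⟨hp, hs, hc⟩ := ih (List.pairwise_cons.mp ha).2 hb
    simp only [pvMergeCount, if_pos hle]
    refine ⟨?_, ?_, ?_⟩
    · simpa using hp.cons x
    · rw [List.pairwise_cons]
      refine ⟨?_, hs⟩
      intro z hz
      have hz' := hp.mem_iff.mp hz
      rcases List.mem_append.mp hz' with h1 | h2
      · exact (List.pairwise_cons.mp ha).1 z h1
      · rcases List.mem_cons.mp h2 with h3 | h4
        · exact h3 ▸ hle
        · exact le_trans hle ((List.pairwise_cons.mp hb).1 z h4)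
    · rw [hc]
      have : (y :: ys).countP (fun y' => decide (y' < x)) = 0 := by
        rw [List.countP_eq_zero]
        intro z hz
        rcases List.mem_cons.mp hz with h3 | h4
        · simpa [h3] using not_lt.mpr hle
        · simpa using not_lt.mpr (le_trans hle ((List.pairwise_cons.mp hb).1 z h4))
      rw [pvCross_cons_left, this]; simp
  | case4 x xs y ys hle ih =>
    intro ha hb
    obtain ⟨hp, hs, hc⟩ := ih ha (List.pairwise_cons.mp hb).2
    have hyx : y < x := lt_of_not_ge hle
    simp only [pvMergeCount, if_neg hle]
    refine ⟨?_, ?_, ?_⟩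
    · exact (hp.cons y).trans List.perm_middle.symm
    · rw [List.pairwise_cons]
      refine ⟨?_, hs⟩
      intro z hz
      have hz' := hp.mem_iff.mp hz
      rcases List.mem_append.mp hz' with h1 | h2
      · rcases List.mem_cons.mp h1 with h3 | h4
        · exact h3 ▸ le_of_lt hyx
        · exact le_trans (le_of_lt hyx) ((List.pairwise_cons.mp ha).1 z h4)
      · exact (List.pairwise_cons.mp hb).1 z h2
    · rw [hc, pvCross_cons_right]
      have : (x :: xs).countP (fun x' => decide (y < x')) = (x :: xs).length := by
        rw [List.countP_eq_length]
        intro z hz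
        rcases List.mem_cons.mp hz with h3 | h4
        · simpa [h3] using hyx
        · simpa using lt_of_lt_of_le hyx ((List.pairwise_cons.mp ha).1 z h4)
      rw [this]; ring

theorem pvInvCount_len_le_one (a : List Int) (h : a.length ≤ 1) : pvInvCount a = 0 := by
  match a with
  | [] => rfl
  | [x] => simp [pvInvCount]
  | x :: y :: t => simp at h

theorem pvMsort_spec : ∀ (a : List Int),
    (pvMsort a).1.Perm a ∧ (pvMsort a).1.Pairwise (· ≤ ·) ∧ (pvMsort a).2 = pvInvCount a := by
  intro a
  induction a using pvMsort.induct with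
  | case1 a h =>
    rw [pvMsort, dif_pos h]
    refine ⟨List.Perm.refl a, ?_, (pvInvCount_len_le_one a h).symm⟩
    match a, h with
    | [], _ => exact List.Pairwise.nil
    | [x], _ => simp
  | case2 a h m ihL ihR =>
    rw [pvMsort, dif_neg h]
    show (pvMergeCount (pvMsort (a.take m)).1 (pvMsort (a.drop m)).1).1.Perm a ∧
      List.Pairwise (· ≤ ·) (pvMergeCount (pvMsort (a.take m)).1 (pvMsort (a.drop m)).1).1 ∧
      (pvMsort (a.take m)).2 + (pvMsort (a.drop m)).2 +
        (pvMergeCount (pvMsort (a.take m)).1 (pvMsort (a.drop m)).1).2 = pvInvCount a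
    obtain ⟨pL, sL, cL⟩ := ihL
    obtain ⟨pR, sR, cR⟩ := ihR
    obtain ⟨pM, sM, cM⟩ := pvMergeCount_spec _ _ sL sR
    refine ⟨?_, sM, ?_⟩
    · exact pM.trans ((pL.append pR).trans (by rw [List.take_append_drop]))
    · rw [cM, cL, cR, pvCross_perm_left pL, pvCross_perm_right _ pR]
      have := pvInvCount_append (a.take m) (a.drop m)
      rw [List.take_append_drop] at this
      omega

-- lookups in pvPosDict succeed exactly on members of order2
theorem pvFoldlInsert_isSome : ∀ (ps : List (Int × Int)) (d : PySem.Dict Int Int) (x : Int),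
    (x ∈ ps.map (·.2) ∨ (d.get? x).isSome) →
    ((ps.foldl (fun d p => d.insert p.2 p.1) d).get? x).isSome := by
  intro ps
  induction ps with
  | nil => intro d x h; simpa using h
  | cons p t ih =>
    intro d x h
    apply ih
    by_cases he : x = p.2
    · right; rw [he, PySem.Dict.get?_insert_self]; rfl
    · cases h with
      | inl hm =>
        rcases List.mem_cons.mp hm with h1 | h2
        · exact absurd h1 he
        · exact Or.inl h2
      | inr hs => right; rwa [PySem.Dict.get?_insert_of_ne (hne := he)]

theorem pvPosDict_isSome {x : Int} {order2 : List Int} (h : x ∈ order2) :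
    ((pvPosDict order2).get? x).isSome := by
  apply pvFoldlInsert_isSome
  left
  rw [PySem.List.map_snd_enumerate]
  exact h

theorem pvMapM_eq_some (pos : PySem.Dict Int Int) (c : List Int)
    (h : ∀ x ∈ c, (pos.get? x).isSome) :
    c.mapM (fun x => pos.get? x) = some (c.map (fun x => (pos.get? x).getD 0)) := by
  induction c with
  | nil => simp
  | cons x t ih =>
    obtain ⟨v, hv⟩ := Option.isSome_iff_exists.mp (h x (List.mem_cons_self))
    rw [List.mapM_cons, hv, ih (fun y hy => h y (List.mem_cons_of_mem _ hy))]
    simp [hv]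

theorem pvOptFoldlMapAdd (g : Int → Int) : ∀ (js : List Int) (a0 : Option Int),
    js.foldl (fun a j => a.map (fun t => t + g j)) a0 = a0.map (fun t => t + (js.map g).sum) := by
  intro js
  induction js with
  | nil => intro a0; cases a0 <;> simp
  | cons j t ih =>
    intro a0
    simp only [List.foldl_cons, ih, List.map_cons, List.sum_cons]
    cases a0 with
    | none => simp
    | some v => simp; ring

theorem pvSum_drop (seq : List Int) :
    ((List.range seq.length).map
      (fun k => ((seq.drop (k + 1)).countP (fun y => decide (y < seq.getD k 0)) : Int))).sum
      = pvInvCount seq := by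
  induction seq with
  | nil => simp [pvInvCount]
  | cons x t ih =>
    rw [List.length_cons, List.range_succ_eq_map, List.map_cons, List.map_map, List.sum_cons]
    simp only [Function.comp_def, List.drop_succ_cons, List.getD_cons_succ, List.drop_zero,
      List.getD_cons_zero]
    rw [ih, pvInvCount]

theorem pvSum_inner (seq : List Int) :
    ((PySem.List.pyRange 0 (seq.length : Int) 1).map
      (fun i => ((PySem.List.pyRange (i + 1) (seq.length : Int) 1).map
        (fun j => if PySem.List.pyGetD seq j 0 < PySem.List.pyGetD seq i 0 then (1 : Int) else 0)).sum)).sum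
      = pvInvCount seq := by
  rw [PySem.List.pyRange_zero_nat, List.map_map]
  rw [← pvSum_drop seq]
  congr 1
  apply List.map_congr_left
  intro k hk
  have hk' : k < seq.length := List.mem_range.mp hk
  simp only [Function.comp_def]
  have h1 : ((k : Int) + 1) = ((k + 1 : Nat) : Int) := by push_cast; ring
  rw [h1]
  have hcomp : (fun j => if PySem.List.pyGetD seq j 0 < PySem.List.pyGetD seq (k : Int) 0 then (1 : Int) else 0)
      = (fun y => if decide (y < PySem.List.pyGetD seq (k : Int) 0) = true then (1 : Int) else 0) ∘
        (fun j => PySem.List.pyGetD seq j 0) := by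
    funext j
    simp [Function.comp]
  rw [hcomp, ← List.map_map]
  rw [PySem.List.map_pyGetD_pyRange' seq 0 (a := ((k + 1 : Nat) : Int)) (by positivity)]
  rw [PySem.List.sum_map_ite_one_zero]
  rw [PySem.List.pyGetD_natCast]
  simp only [Int.toNat_natCast]

theorem pvKendall_eq (order1 order2 : List Int)
    (h : ∀ x ∈ order1, ((pvPosDict order2).get? x).isSome) :
    kendall_tau_dist order1 order2 =
      some (pvInvCount (order1.map (fun x => ((pvPosDict order2).get? x).getD 0))) := by
  unfold kendall_tau_dist
  have hsome : ∀ x ∈ order1, (pvPosDict order2).get? x = some (((pvPosDict order2).get? x).getD 0) := by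
    intro x hx
    obtain ⟨v, hv⟩ := Option.isSome_iff_exists.mp (h x hx)
    simp [hv]
  set pos := pvPosDict order2 with hpos
  set seq := order1.map (fun x => (pos.get? x).getD 0) with hseq
  have hlen : seq.length = order1.length := List.length_map ..
  have hcong : ∀ (acc : Option Int), ∀ i ∈ PySem.List.pyRange 0 (order1.length : Int) 1,
      (PySem.List.pyRange (i + 1) (order1.length : Int) 1).foldl
        (fun acc j =>
          match PySem.List.pyGet? order1 i, PySem.List.pyGet? order1 j with
          | some xi, some xj =>
            match pos.get? xi, pos.get? xj with
            | some pi, some pj => acc.map (fun inv => if pj < pi then inv + 1 else inv)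
            | _, _ => none
          | _, _ => none)
        acc
      = acc.map (fun t => t + ((PySem.List.pyRange (i + 1) (order1.length : Int) 1).map
          (fun j => if PySem.List.pyGetD seq j 0 < PySem.List.pyGetD seq i 0 then (1 : Int) else 0)).sum) := by
    intro acc i hi
    obtain ⟨hi0, hin⟩ := (PySem.List.mem_pyRange_one).mp hi
    rw [PySem.List.foldl_congr_mem (g := fun acc j =>
      acc.map (fun t => t + (if PySem.List.pyGetD seq j 0 < PySem.List.pyGetD seq i 0 then (1 : Int) else 0)))]
    · exact pvOptFoldlMapAdd _ _ acc
    · intro acc' j hj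
      obtain ⟨hj1, hjn⟩ := (PySem.List.mem_pyRange_one).mp hj
      have hj0 : (0 : Int) ≤ j := by omega
      have hseqget : ∀ (k : Int) (h0 : 0 ≤ k) (hk : k < (order1.length : Int)),
          PySem.List.pyGetD seq k 0 = (pos.get? (order1[k.toNat]'(by omega))).getD 0 := by
        intro k h0 hk
        rw [PySem.List.pyGetD_eq_getElem seq (i := k) 0 h0 (by rw [hlen]; exact hk)]
        simp [hseq]
      obtain ⟨vi, hvi⟩ := Option.isSome_iff_exists.mp (h _ (List.getElem_mem (l := order1) (n := i.toNat) (by omega)))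
      obtain ⟨vj, hvj⟩ := Option.isSome_iff_exists.mp (h _ (List.getElem_mem (l := order1) (n := j.toNat) (by omega)))
      have hvi' : PySem.List.pyGetD seq i 0 = vi := by rw [hseqget i hi0 hin, hvi]; rfl
      have hvj' : PySem.List.pyGetD seq j 0 = vj := by rw [hseqget j hj0 hjn, hvj]; rfl
      rw [PySem.List.pyGet?_eq_some_getElem order1 hi0 hin,
          PySem.List.pyGet?_eq_some_getElem order1 hj0 hjn]
      rw [hvi', hvj']
      simp only [hvi, hvj]
      cases acc' with
      | none => rfl
      | some v =>
        simp only [Option.map_some]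
        congr 1
        split <;> omega
  change List.foldl _ (some 0) (PySem.List.pyRange 0 ((order1.length : Int)) 1) = _
  rw [PySem.List.foldl_congr_mem _ _ _ _ hcong]
  rw [pvOptFoldlMapAdd]
  rw [← hlen]
  rw [pvSum_inner seq]
  simp

theorem pvKendall_short (order1 order2 : List Int) (h : order1.length < 2) :
    kendall_tau_dist order1 order2 = some 0 := by
  match order1, h with
  | [], _ =>
    unfold kendall_tau_dist
    rw [PySem.List.pyRange_one_eq_nil (by simp)]
    rfl
  | [x], _ =>
    unfold kendall_tau_dist
    have h1 : PySem.List.pyRange 0 ((([x] : List Int).length : Int)) 1 = [0] := by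
      norm_num
      rw [PySem.List.pyRange_one_cons (by norm_num), PySem.List.pyRange_one_eq_nil (by norm_num)]
    rw [h1]
    simp only [List.foldl_cons, List.foldl_nil]
    rw [PySem.List.pyRange_one_eq_nil (by simp)]
    rfl

theorem pvLoop_eq (freq_order : List Int) : ∀ (rol : List (List Int)),
    (∀ c ∈ rol, 2 ≤ c.length → ∀ x ∈ c, x ∈ freq_order) → ∀ (maxD : Int) (best : Option (List Int)),
    pvALoop freq_order rol maxD best = pvAltLoop (pvPosDict freq_order) rol maxD best := by
  intro rol
  induction rol with
  | nil => intro _ maxD best; rfl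
  | cons c rest ih =>
    intro hpre maxD best
    have hrest : ∀ c' ∈ rest, 2 ≤ c'.length → ∀ x ∈ c', x ∈ freq_order :=
      fun c' h' => hpre c' (List.mem_cons_of_mem _ h')
    by_cases hlt : c.length < 2
    · rw [pvALoop, pvAltLoop, if_pos hlt, pvKendall_short c freq_order hlt]
      dsimp only
      split
      · exact ih hrest _ _
      · exact ih hrest _ _
    · have hc : ∀ x ∈ c, ((pvPosDict freq_order).get? x).isSome :=
        fun x hx => pvPosDict_isSome (hpre c List.mem_cons_self (by omega) x hx)
      rw [pvALoop, pvAltLoop, if_neg hlt, pvKendall_eq c freq_order hc, pvMapM_eq_some _ c hc]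
      dsimp only
      rw [(pvMsort_spec (c.map (fun x => ((pvPosDict freq_order).get? x).getD 0))).2.2]
      split
      · exact ih hrest _ _
      · exact ih hrest _ _

-- ===== VERDICT (by name: the statement is the Claim_ definition above) =====
theorem get_dispersion_order_spec : Claim_equal_get_dispersion_order := by
  intro rol freq _hdom hpre
  unfold Spec_get_dispersion_order get_dispersion_order get_dispersion_order_alt
  exact pvLoop_eq freq rol hpre (-1) none
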